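-- pv_equiv track=rewrite | github.com/RadionBik/parse_MSC_VLR_from_IR21 | parseIR21_MSC_VLR.py | removeSubsetGT
-- ===== SOURCE A (Python) =====
-- def removeSubsetGT(GTs):
--     '''
--     removeSubsetGT() removes GTs entries that are subset of another within
--     the operator
--     '''
--     uniqueGTs=[]
--     subsetGTs=[]
--     for gt in GTs:
--         for checkGT in GTs:
--             if checkGT[0].startswith(gt[0]) and checkGT[0]!=gt[0]:
--                 subsetGTs.append(checkGT)
--         if gt not in subsetGTs:
--             uniqueGTs.append(gt)
--     return uniqueGTs
-- ===== SOURCE B (Python) =====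
-- def removeSubsetGT(GTs):
--     '''
--     removeSubsetGT() removes GTs entries that are subset of another within
--     the operator
--     '''
--     uniqueGTs = []
--     seen = set()
--     for gt in GTs:
--         s = gt[0]
--         if not any(s[:k] in seen for k in range(len(s))):
--             uniqueGTs.append(gt)
--         seen.add(s)
--     return uniqueGTs
-- ===== Notes on version B (the rewrite author's own statement) =====
-- stated objective: faster
-- what changed: Replaces the nested scan over all pairs plus membership tests in an ever-growing subset list with a single pass that keeps a set of already-seen first strings and checks each entry's proper prefixes against it.
import Mathlib
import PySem

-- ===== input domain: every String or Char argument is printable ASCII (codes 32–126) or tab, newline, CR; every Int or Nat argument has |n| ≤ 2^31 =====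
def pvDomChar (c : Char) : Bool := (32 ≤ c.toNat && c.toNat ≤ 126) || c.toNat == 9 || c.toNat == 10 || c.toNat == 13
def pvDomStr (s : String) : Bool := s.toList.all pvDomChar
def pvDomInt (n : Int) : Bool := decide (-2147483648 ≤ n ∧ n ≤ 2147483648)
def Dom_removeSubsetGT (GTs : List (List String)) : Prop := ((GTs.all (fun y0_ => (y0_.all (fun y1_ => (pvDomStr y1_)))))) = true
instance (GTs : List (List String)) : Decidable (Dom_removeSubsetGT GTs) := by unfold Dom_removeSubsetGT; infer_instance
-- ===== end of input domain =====

-- B replaces A's nested all-pairs scans and growing subset list with one pass over a set of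
-- already-seen first strings, checking each entry's proper prefixes against it.

-- ===== PORT A =====
def removeSubsetGT (GTs : List (List String)) : List (List String) :=
  (GTs.foldl (fun (st : List (List String) × List (List String)) gt =>
      let sub := GTs.foldl (fun acc checkGT =>
          if PySem.Str.startswith checkGT.headI gt.headI && checkGT.headI != gt.headI
          then acc ++ [checkGT] else acc) st.2
      (if gt ∈ sub then st.1 else st.1 ++ [gt], sub))
    ([], [])).1

-- ===== PORT B =====
def removeSubsetGT_alt (GTs : List (List String)) : List (List String) :=
  (GTs.foldl (fun (st : List (List String) × PySem.Set String) gt =>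
      let s := gt.headI
      let bad := (List.range s.toList.length).any
        (fun k => PySem.Set.contains st.2 (PySem.Str.slice s none (some (k : Int))))
      (if bad then st.1 else st.1 ++ [gt], PySem.Set.add st.2 s))
    ([], PySem.Set.empty)).1

-- ===== PRECONDITION & SPEC =====
-- Pre_ excludes inputs containing an empty entry, on which Python A raises IndexError at gt[0].
def Pre_removeSubsetGT (GTs : List (List String)) : Prop := ∀ gt ∈ GTs, gt ≠ []
instance (GTs : List (List String)) : Decidable (Pre_removeSubsetGT GTs) := by unfold Pre_removeSubsetGT; infer_instance
def pvWitness_removeSubsetGT : List (List String) := [["a"], ["ab"], ["b", "x"]]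

def Spec_removeSubsetGT (GTs : List (List String)) (out : List (List String)) : Prop := out = removeSubsetGT_alt GTs
instance (GTs : List (List String)) (out : List (List String)) : Decidable (Spec_removeSubsetGT GTs out) := by unfold Spec_removeSubsetGT; infer_instance

-- ===== CLAIM (what is proved, stated in full; the proofs are below) =====
def Claim_equal_removeSubsetGT : Prop := ∀ (GTs : List (List String)), Dom_removeSubsetGT GTs → Pre_removeSubsetGT GTs → Spec_removeSubsetGT GTs (removeSubsetGT GTs)

-- ===== LEMMAS AND PROOFS =====

-- "t is a proper prefix of s", A's inner-loop condition read as a predicate on the two strings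
def propB (t s : String) : Bool := PySem.Str.startswith s t && s != t

-- reference loop: keep gt iff no already-seen first string properly prefixes gt's first string
def specLoop : List (List String) → List String → List (List String)
  | [], _ => []
  | gt :: rest, seen =>
      if seen.any (fun t => propB t gt.headI)
      then specLoop rest (seen ++ [gt.headI])
      else gt :: specLoop rest (seen ++ [gt.headI])

lemma propB_iff (t s : String) : propB t s = true ↔ (t.toList <+: s.toList ∧ t ≠ s) := by
  simp [propB, PySem.Str.startswith_eq, PySem.Chars.startswith_iff]
  intro _; constructor <;> intro h <;> simp_all [ne_comm]

lemma propB_self (s : String) : propB s s = false := by simp [propB]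

lemma slice_toList (s : String) (k : Nat) :
    (PySem.Str.slice s none (some (k : Int))).toList = s.toList.take k := by
  simp [PySem.List.slice_to_natCast]

-- proper prefixes of s among pool are exactly its slices s[:k], k < len s, that lie in pool
lemma slice_mem_iff (s : String) (pool : List String) :
    ((List.range s.toList.length).any
      (fun k => PySem.Set.contains pool (PySem.Str.slice s none (some (k : Int)))) = true)
    ↔ ∃ t ∈ pool, propB t s = true := by
  simp only [List.any_eq_true, List.mem_range, PySem.Set.contains, List.contains_iff_mem]
  constructor
  · rintro ⟨k, hk, ht⟩
    refine ⟨_, ht, ?_⟩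
    rw [propB_iff, slice_toList]
    refine ⟨List.take_prefix _ _, fun he => ?_⟩
    have h2 := congrArg String.toList he
    rw [slice_toList] at h2
    have hl := congrArg List.length h2
    rw [List.length_take] at hl
    omega
  · rintro ⟨t, htm, hp⟩
    rw [propB_iff] at hp
    obtain ⟨hpre, hne⟩ := hp
    refine ⟨t.toList.length, ?_, ?_⟩
    · rcases lt_or_eq_of_le hpre.length_le with h | h
      · exact h
      · exact absurd (String.toList_inj.mp (List.IsPrefix.eq_of_length hpre h)) hne
    · have : (PySem.Str.slice s none (some (t.toList.length : Int))).toList = t.toList := by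
        rw [slice_toList, ← List.prefix_iff_eq_take.mp hpre]
      rwa [String.toList_inj.mp this]

lemma A_loop (GTs : List (List String)) :
    ∀ (rest : List (List String)) (u sub : List (List String)) (seen : List String),
    (∀ x ∈ rest, x ∈ GTs) →
    (∀ x : List String, x ∈ sub ↔ x ∈ GTs ∧ seen.any (fun t => propB t x.headI) = true) →
    (rest.foldl (fun (st : List (List String) × List (List String)) gt =>
      let sub := GTs.foldl (fun acc checkGT =>
          if PySem.Str.startswith checkGT.headI gt.headI && checkGT.headI != gt.headI
          then acc ++ [checkGT] else acc) st.2
      (if gt ∈ sub then st.1 else st.1 ++ [gt], sub)) (u, sub)).1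
    = u ++ specLoop rest seen := by
  intro rest
  induction rest with
  | nil => intro u sub seen _ _; simp [specLoop]
  | cons gt rest ih =>
    intro u sub seen hrest hinv
    simp only [List.foldl_cons]
    have hsub' : ∀ x : List String,
        x ∈ (GTs.foldl (fun acc checkGT =>
          if PySem.Str.startswith checkGT.headI gt.headI && checkGT.headI != gt.headI
          then acc ++ [checkGT] else acc) sub)
        ↔ x ∈ GTs ∧ (seen ++ [gt.headI]).any (fun t => propB t x.headI) = true := by
      intro x
      rw [PySem.List.foldl_append_if_eq_filter]
      simp only [propB, List.mem_append, List.mem_filter, hinv, List.any_append, List.any_cons,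
        List.any_nil, Bool.or_eq_true, Bool.or_false]
      tauto
    have hkeep : (gt ∈ (GTs.foldl (fun acc checkGT =>
          if PySem.Str.startswith checkGT.headI gt.headI && checkGT.headI != gt.headI
          then acc ++ [checkGT] else acc) sub))
        ↔ seen.any (fun t => propB t gt.headI) = true := by
      rw [hsub']
      simp [List.any_append, propB_self, hrest gt (by simp)]
    by_cases hb : seen.any (fun t => propB t gt.headI) = true
    · simp only [specLoop, hb, if_true]
      rw [if_pos (hkeep.mpr hb)]
      exact ih u _ _ (fun x hx => hrest x (by simp [hx])) hsub'
    · simp only [specLoop, hb]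
      rw [if_neg (fun h => hb (hkeep.mp h))]
      rw [ih (u ++ [gt]) _ _ (fun x hx => hrest x (by simp [hx])) hsub']
      simp

lemma B_loop :
    ∀ (rest : List (List String)) (u : List (List String)) (st : PySem.Set String) (seen : List String),
    (∀ t : String, t ∈ st ↔ t ∈ seen) →
    (rest.foldl (fun (st : List (List String) × PySem.Set String) gt =>
      let s := gt.headI
      let bad := (List.range s.toList.length).any
        (fun k => PySem.Set.contains st.2 (PySem.Str.slice s none (some (k : Int))))
      (if bad then st.1 else st.1 ++ [gt], PySem.Set.add st.2 s)) (u, st)).1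
    = u ++ specLoop rest seen := by
  intro rest
  induction rest with
  | nil => intro u st seen _; simp [specLoop]
  | cons gt rest ih =>
    intro u st seen hinv
    simp only [List.foldl_cons]
    have hmem : ∀ t : String, t ∈ PySem.Set.add st gt.headI ↔ t ∈ seen ++ [gt.headI] := by
      intro t
      rw [PySem.Set.mem_add st gt.headI t]
      simp [hinv]
    have hbad : ((List.range gt.headI.toList.length).any
        (fun k => PySem.Set.contains st (PySem.Str.slice gt.headI none (some (k : Int)))) = true)
        ↔ seen.any (fun t => propB t gt.headI) = true := by
      rw [slice_mem_iff]
      simp only [List.any_eq_true]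
      constructor
      · rintro ⟨t, ht, hp⟩; exact ⟨t, (hinv t).1 ht, hp⟩
      · rintro ⟨t, ht, hp⟩; exact ⟨t, (hinv t).2 ht, hp⟩
    by_cases hb : seen.any (fun t => propB t gt.headI) = true
    · simp only [specLoop, hb, if_true]
      rw [if_pos (hbad.mpr hb)]
      exact ih u _ _ hmem
    · simp only [specLoop, hb]
      rw [if_neg (fun h => hb (hbad.mp h))]
      rw [ih (u ++ [gt]) _ _ hmem]
      simp

-- ===== VERDICT (by name: the statement is the Claim_ definition above) =====
theorem removeSubsetGT_spec : Claim_equal_removeSubsetGT := by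
  intro GTs _ _
  unfold Spec_removeSubsetGT removeSubsetGT removeSubsetGT_alt
  rw [A_loop GTs GTs [] [] [] (fun x h => h) (by simp),
      B_loop GTs [] PySem.Set.empty [] (by simp [PySem.Set.empty])]
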